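-- pv_equiv track=rewrite | github.com/Barsik-Barbosik/Tone-Mutant | external/sysex_highlighter.py | find_space_positions
-- ===== SOURCE A (Python) =====
-- def find_space_positions(string):
--     positions = [0]
--     index = -1
--     while True:
--         try:
--             index = string.index(" ", index + 1)
--             if index - 1 >= 0 and string[index - 1] == " ":
--                 continue
--             positions.append(index)
--         except ValueError:
--             break
--     return positions
-- ===== SOURCE B (Python) =====
-- def find_space_positions(string):
--     positions = [0]
--     prev_space = False
--     for i, ch in enumerate(string):
--         if ch == " " and not prev_space:
--             positions.append(i)
--         prev_space = ch == " "
--     return positions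
-- ===== Notes on version B (the rewrite author's own statement) =====
-- stated objective: idiomatic
-- what changed: Replaced the while-True loop that jumps between spaces with str.index plus try/except ValueError by a single for-loop over enumerate(string) carrying a previous-char-was-space flag.
import Mathlib
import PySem

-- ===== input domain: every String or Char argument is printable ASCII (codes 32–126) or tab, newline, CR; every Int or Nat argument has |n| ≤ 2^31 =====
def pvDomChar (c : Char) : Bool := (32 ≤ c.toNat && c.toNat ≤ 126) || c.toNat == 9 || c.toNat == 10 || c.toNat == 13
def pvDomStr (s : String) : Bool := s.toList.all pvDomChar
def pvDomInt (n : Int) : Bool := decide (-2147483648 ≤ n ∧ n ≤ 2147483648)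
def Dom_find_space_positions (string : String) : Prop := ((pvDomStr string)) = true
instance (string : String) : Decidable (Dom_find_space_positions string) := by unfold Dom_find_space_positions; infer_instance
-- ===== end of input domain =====

-- B replaces A's while-True / str.index / try-except jumping with a single fold over
-- enumerate(string) carrying a previous-char-was-space flag (objective: idiomatic).

-- ===== PORT A =====
-- A's while-True loop: 'index = string.index(" ", index + 1)' jumps to the next space;
-- ValueError (findFrom result -1) breaks. fuel only makes the loop total; the entry
-- call below supplies enough for every input.
def findA_loop (cs : List Char) : Nat → Nat → List Int → List Int
  | 0, _, positions => positions
  | fuel + 1, start, positions =>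
    let idx := PySem.Chars.findFrom cs [' '] (start : Int) none
    if idx = -1 then positions
    else if 1 ≤ idx.toNat ∧ PySem.List.pyGetD cs (idx - 1) 'x' = ' ' then
      findA_loop cs fuel (idx.toNat + 1) positions
    else
      findA_loop cs fuel (idx.toNat + 1) (positions ++ [idx])

def find_space_positions (string : String) : List Int :=
  findA_loop string.toList (string.toList.length + 1) 0 [0]

-- ===== PORT B =====
def find_space_positions_alt (string : String) : List Int :=
  ((PySem.List.enumerate string.toList 0).foldl
    (fun (st : List Int × Bool) p =>
      ((if p.2 = ' ' ∧ st.2 = false then st.1 ++ [p.1] else st.1), p.2 == ' '))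
    ([0], false)).1

-- ===== PRECONDITION & SPEC =====
def Spec_find_space_positions (string : String) (out : List Int) : Prop := out = find_space_positions_alt string
instance (string : String) (out : List Int) : Decidable (Spec_find_space_positions string out) := by unfold Spec_find_space_positions; infer_instance

-- ===== CLAIM (what is proved, stated in full; the proofs are below) =====
def Claim_equal_find_space_positions : Prop := ∀ (string : String), Dom_find_space_positions string → Spec_find_space_positions string (find_space_positions string)

-- ===== LEMMAS AND PROOFS =====

-- Common characterisation: positions (absolute, starting at i) of the spaces in the
-- list not preceded by a space; p says whether the char just before the list is a space.
def starts (p : Bool) (i : Int) : List Char → List Int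
  | [] => []
  | c :: rest =>
    if c = ' ' ∧ p = false then i :: starts true (i + 1) rest
    else starts (c == ' ') (i + 1) rest

lemma starts_no_space (l : List Char) (p : Bool) (i : Int) (h : ' ' ∉ l) :
    starts p i l = [] := by
  induction l generalizing p i with
  | nil => rfl
  | cons c rest ih =>
    simp only [List.mem_cons, not_or] at h
    simp [starts, Ne.symm h.1, ih _ _ h.2]

-- Splitting starts at the first space (position k).
lemma starts_split (k : Nat) (l : List Char) (p : Bool) (i : Int) (hk : k < l.length)
    (hsp : l[k] = ' ') (hmin : ∀ j, (hj : j < k) → l[j]'(by omega) ≠ ' ') :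
    starts p i l = (if k = 0 ∧ p = true then [] else [i + k]) ++
      starts true (i + k + 1) (l.drop (k + 1)) := by
  induction k generalizing l p i with
  | zero =>
    cases l with
    | nil => simp at hk
    | cons c rest =>
      simp only [List.getElem_cons_zero] at hsp
      subst hsp
      cases p with
      | false => simp [starts]
      | true => simp [starts]
  | succ k ihk =>
    cases l with
    | nil => simp at hk
    | cons c rest =>
      have hc : c ≠ ' ' := by
        have := hmin 0 (by omega)
        simpa using this
      rw [starts, if_neg (by simp [hc])]
      have := ihk rest false (i + 1) (by simpa using hk)
        (by simpa using hsp)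
        (by intro j hj; have := hmin (j + 1) (by omega); simpa using this)
      have hb : (c == ' ') = false := by simp [hc]
      rw [hb, this]
      have hne : ¬ ((k + 1) = 0 ∧ p = true) := by omega
      rw [if_neg hne, if_neg (by simp)]
      congr 2 <;> push_cast <;> ring

-- B's fold equals acc ++ starts.
lemma foldB (l : List Char) (i : Int) (acc : List Int) (p : Bool) :
    (((PySem.List.enumerate l i).foldl
      (fun (st : List Int × Bool) q =>
        ((if q.2 = ' ' ∧ st.2 = false then st.1 ++ [q.1] else st.1), q.2 == ' '))
      (acc, p))).1 = acc ++ starts p i l := by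
  induction l generalizing i acc p with
  | nil => simp [PySem.List.enumerate_nil, starts]
  | cons c rest ih =>
    rw [PySem.List.enumerate_cons]
    simp only [List.foldl_cons, starts]
    by_cases hc : c = ' ' ∧ p = false
    · simp [hc.1, hc.2, ih, List.append_assoc]
    · simp only [if_neg hc]
      exact ih _ _ _

-- A's loop equals acc ++ starts, when entered with prev-is-space ↔ 0 < start.
lemma loopA (cs : List Char) (fuel start : Nat) (acc : List Int)
    (hfuel : cs.length + 1 ≤ fuel + start) (hstart : start ≤ cs.length)
    (hprev : start = 0 ∨ cs[start - 1]? = some ' ') :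
    findA_loop cs fuel start acc =
      acc ++ starts (decide (0 < start)) (start : Int) (cs.drop start) := by
  induction fuel generalizing start acc with
  | zero => omega
  | succ f ih =>
    rw [findA_loop]
    by_cases hidx : PySem.Chars.findFrom cs [' '] (start : Int) none = -1
    · rw [if_pos hidx]
      have hnotin := (PySem.Chars.findFrom_natCast_eq_neg_one_iff cs [' '] start hstart).mp hidx
      rw [starts_no_space _ _ _ (fun hmem => hnotin ((List.singleton_infix_iff _ _).mpr hmem))]
      simp
    · rw [if_neg hidx]
      obtain ⟨hge, hpre, hmin⟩ := PySem.Chars.findFrom_natCast_spec cs [' '] start hstart hidx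
      set idx := PySem.Chars.findFrom cs [' '] (start : Int) none with hidxdef
      have hidx0 : (0 : Int) ≤ idx := le_trans (by exact_mod_cast Nat.zero_le start) hge
      obtain ⟨t, ht⟩ := hpre
      simp only [List.singleton_append] at ht
      have hlt : idx.toNat < cs.length := by
        have := congrArg List.length ht
        simp [List.length_drop] at this
        omega
      have hspace : cs[idx.toNat]'hlt = ' ' := by
        have h1 : (List.drop idx.toNat cs)[0]'(by simp; omega) = ' ' := by
          simp [← ht]
        rwa [List.getElem_drop] at h1
      have hnospace : ∀ j, start ≤ j → j < idx.toNat → ∀ (hj : j < cs.length), cs[j]'hj ≠ ' ' := by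
        intro j hj1 hj2 hj hsp
        apply hmin j hj1 hj2
        refine ⟨List.drop (j + 1) cs, ?_⟩
        rw [List.singleton_append, ← hsp]
        exact List.getElem_cons_drop hj
      have hsn : start ≤ idx.toNat := by omega
      have hcast : ((idx.toNat : Int)) = idx := Int.toNat_of_nonneg hidx0
      -- rewrite starts on cs.drop start via starts_split at k = idx.toNat - start
      have hsplit := starts_split (idx.toNat - start) (cs.drop start) (decide (0 < start)) (start : Int)
        (by simp [List.length_drop]; omega)
        (by simpa [List.getElem_drop, Nat.add_sub_cancel' hsn] using hspace)
        (by intro j hj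
            simpa [List.getElem_drop] using hnospace (start + j) (by omega) (by omega) (by omega))
      rw [hsplit]
      have hik : (start : Int) + ((idx.toNat - start : Nat) : Int) = (idx.toNat : Int) := by
        push_cast [Nat.cast_sub hsn]; ring
      rw [List.drop_drop, hik]
      rw [show start + (idx.toNat - start + 1) = idx.toNat + 1 by omega]
      -- the recursive call, by ih
      have hrec : ∀ acc', findA_loop cs f (idx.toNat + 1) acc' =
          acc' ++ starts true ((idx.toNat : Int) + 1) (cs.drop (idx.toNat + 1)) := by
        intro acc'
        have := ih (idx.toNat + 1) acc' (by omega) (by omega)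
          (Or.inr (by simp [List.getElem?_eq_getElem hlt, hspace]))
        simpa using this
      -- the skip test of A vs. the (k = 0 ∧ p) test of starts_split
      have hgetd : ∀ _ : 1 ≤ idx.toNat, PySem.List.pyGetD cs (idx - 1) 'x' = cs[(idx - 1).toNat]'(by omega) :=
        fun h1 => PySem.List.pyGetD_eq_getElem cs 'x' (by omega) (by omega)
      by_cases hskip : 1 ≤ idx.toNat ∧ PySem.List.pyGetD cs (idx - 1) 'x' = ' '
      · rw [if_pos hskip, hrec]
        obtain ⟨hs1, hs2⟩ := hskip
        rw [hgetd hs1] at hs2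
        have hk0 : idx.toNat - start = 0 ∧ decide (0 < start) = true := by
          constructor
          · -- if idx.toNat > start then cs[idx.toNat - 1] ≠ ' ', contradicting hs2
            by_contra hne
            exact hnospace ((idx - 1).toNat) (by omega) (by omega) (by omega) hs2
          · -- start = 0 would make idx = 0 (a space at 0 with no space before), so 1 ≤ idx.toNat forces idx > start = 0? no:
            -- if start = 0 and 1 ≤ idx.toNat then cs[idx.toNat - 1] ≠ ' ' by hnospace, contradicting hs2
            simp only [decide_eq_true_eq]
            by_contra hne
            exact hnospace ((idx - 1).toNat) (by omega) (by omega) (by omega) hs2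
        rw [if_pos hk0]
        simp
      · rw [if_neg hskip, hrec]
        have hk0 : ¬ (idx.toNat - start = 0 ∧ decide (0 < start) = true) := by
          rintro ⟨h1, h2⟩
          simp only [decide_eq_true_eq] at h2
          apply hskip
          refine ⟨by omega, ?_⟩
          rcases hprev with h | h
          · omega
          · rw [hgetd (by omega)]
            have h' : cs[(idx - 1).toNat]? = some ' ' := by
              rw [show (idx - 1).toNat = start - 1 by omega]; exact h
            rw [List.getElem?_eq_getElem (by omega)] at h'
            exact Option.some.inj h'
        rw [if_neg hk0]
        simp [hcast]

-- ===== VERDICT (by name: the statement is the Claim_ definition above) =====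
theorem find_space_positions_spec : Claim_equal_find_space_positions := by
  intro s _
  unfold Spec_find_space_positions find_space_positions find_space_positions_alt
  rw [foldB, loopA s.toList (s.toList.length + 1) 0 [0] (by omega) (by omega) (Or.inl rfl)]
  simp
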